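-- pv_equiv track=rewrite | github.com/mukesh-Guntumadugu/llm_beatmap_generator | src/freeman_coding.py | decode_freeman_8
-- ===== SOURCE A (Python) =====
-- def decode_freeman_8(chain_code, start_point=(0, 0)):
--     """
--     Decode an 8-directional Freeman Chain Code back into a sequence of points.
--
--     Args:
--         chain_code (list of int): The Freeman chain code (values 0-7).
--         start_point (tuple): The starting (x, y) coordinate.
--
--     Returns:
--         list of tuple: The sequence of (x, y) coordinates.
--     """
--     # Mapping directions to (dx, dy) based on the above encode mapping
--     direction_map = {
--         0: (1, 0),
--         1: (1, 1),
--         2: (0, 1),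
--         3: (-1, 1),
--         4: (-1, 0),
--         5: (-1, -1),
--         6: (0, -1),
--         7: (1, -1)
--     }
--
--     points = [tuple(start_point)]
--     cx, cy = start_point
--
--     for code in chain_code:
--         dx, dy = direction_map.get(code, (0, 0))
--         cx += dx
--         cy += dy
--         points.append((cx, cy))
--
--     return points
-- ===== SOURCE B (Python) =====
-- def decode_freeman_8(chain_code, start_point=(0, 0)):
--     # Decompose into two independent 1-D integrations (x-axis, y-axis) with
--     # arithmetic membership tests instead of a dict of vectors, then zip.
--     # Unknown codes contribute 0 on both axes (both memberships are false).
--     x, y = start_point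
--     xs = [x]
--     for c in chain_code:
--         x += (c in (0, 1, 7)) - (c in (3, 4, 5))
--         xs.append(x)
--     ys = [y]
--     for c in chain_code:
--         y += (c in (1, 2, 3)) - (c in (5, 6, 7))
--         ys.append(y)
--     return list(zip(xs, ys))
-- ===== Notes on version B (the rewrite author's own statement) =====
-- stated objective: alternative
-- what changed: Replaces the single loop over a dict of (dx,dy) vectors with two independent per-axis integrations (dx/dy computed arithmetically from code-set membership, no direction table) that are then zipped into points.
import Mathlib
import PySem

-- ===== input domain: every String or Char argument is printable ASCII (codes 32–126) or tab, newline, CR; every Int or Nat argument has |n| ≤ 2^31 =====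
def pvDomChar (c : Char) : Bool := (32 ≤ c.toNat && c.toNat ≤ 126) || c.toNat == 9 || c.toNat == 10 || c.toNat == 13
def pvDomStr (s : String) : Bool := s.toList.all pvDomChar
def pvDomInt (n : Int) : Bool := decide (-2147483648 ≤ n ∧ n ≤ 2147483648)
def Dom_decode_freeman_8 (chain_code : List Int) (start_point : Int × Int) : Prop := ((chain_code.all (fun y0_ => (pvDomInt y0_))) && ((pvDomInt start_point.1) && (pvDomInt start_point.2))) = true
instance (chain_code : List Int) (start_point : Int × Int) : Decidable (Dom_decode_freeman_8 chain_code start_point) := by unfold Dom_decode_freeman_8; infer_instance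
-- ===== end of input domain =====

-- B replaces A's single loop over a dict of (dx,dy) vectors by two independent per-axis
-- integrations (membership-test arithmetic, no direction table) zipped into points (alternative).

-- ===== PORT A =====
-- A's direction_map dict (insertion-order association list)
def pvDirMapA : PySem.Dict Int (Int × Int) :=
  PySem.Dict.ofList [(0, (1, 0)), (1, (1, 1)), (2, (0, 1)), (3, (-1, 1)),
   (4, (-1, 0)), (5, (-1, -1)), (6, (0, -1)), (7, (1, -1))]

def decode_freeman_8 (chain_code : List Int) (start_point : Int × Int) : List (Int × Int) :=
  -- points = [tuple(start_point)]; cx, cy = start_point; for code in chain_code: …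
  let st := chain_code.foldl
    (fun (st : List (Int × Int) × Int × Int) code =>
      let (dx, dy) := PySem.Dict.getD pvDirMapA code (0, 0)
      let cx := st.2.1 + dx
      let cy := st.2.2 + dy
      (st.1 ++ [(cx, cy)], cx, cy))
    ([start_point], start_point.1, start_point.2)
  st.1

-- ===== PORT B =====
-- (c in (0,1,7)) - (c in (3,4,5))  as Int (bool arithmetic)
def pvDx (c : Int) : Int :=
  (if c = 0 ∨ c = 1 ∨ c = 7 then 1 else 0) - (if c = 3 ∨ c = 4 ∨ c = 5 then 1 else 0)
-- (c in (1,2,3)) - (c in (5,6,7))  as Int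
def pvDy (c : Int) : Int :=
  (if c = 1 ∨ c = 2 ∨ c = 3 then 1 else 0) - (if c = 5 ∨ c = 6 ∨ c = 7 then 1 else 0)

-- xs = [x]; for c in chain_code: x += dx; xs.append(x)
def pvAxis (d : Int → Int) (chain_code : List Int) (x : Int) : List Int :=
  (chain_code.foldl (fun (st : List Int × Int) c =>
      let x' := st.2 + d c
      (st.1 ++ [x'], x')) ([x], x)).1

def decode_freeman_8_alt (chain_code : List Int) (start_point : Int × Int) : List (Int × Int) :=
  (pvAxis pvDx chain_code start_point.1).zip (pvAxis pvDy chain_code start_point.2)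

-- ===== PRECONDITION & SPEC =====
def Spec_decode_freeman_8 (chain_code : List Int) (start_point : Int × Int) (out : List (Int × Int)) : Prop := out = decode_freeman_8_alt chain_code start_point
instance (chain_code : List Int) (start_point : Int × Int) (out : List (Int × Int)) : Decidable (Spec_decode_freeman_8 chain_code start_point out) := by unfold Spec_decode_freeman_8; infer_instance

-- ===== CLAIM (what is proved, stated in full; the proofs are below) =====
def Claim_equal_decode_freeman_8 : Prop := ∀ (chain_code : List Int) (start_point : Int × Int), Dom_decode_freeman_8 chain_code start_point → Spec_decode_freeman_8 chain_code start_point (decode_freeman_8 chain_code start_point)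

-- ===== LEMMAS AND PROOFS =====

-- the dict lookup agrees with the per-axis arithmetic displacements, for every code
theorem pvDirMap_eq_dxdy (c : Int) :
    PySem.Dict.getD pvDirMapA c (0, 0) = (pvDx c, pvDy c) := by
  simp only [pvDirMapA, PySem.Dict.ofList, PySem.Dict.update, List.foldl,
    PySem.Dict.getD_insert, PySem.Dict.getD_empty, pvDx, pvDy]
  split_ifs <;> simp_all

-- one axis fold, started with acc ++ [x], produces acc ++ the scan from x
theorem pvAxis_eq_scanl (d : Int → Int) (l : List Int) (acc : List Int) (x : Int) :
    (l.foldl (fun (st : List Int × Int) c =>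
        let x' := st.2 + d c
        (st.1 ++ [x'], x')) (acc ++ [x], x)).1
      = acc ++ List.scanl (fun a c => a + d c) x l := by
  induction l generalizing acc x with
  | nil => simp
  | cons c cs ih =>
    simp only [List.foldl_cons, List.scanl_cons]
    simpa [List.append_assoc] using ih (acc ++ [x]) (x + d c)

-- A's combined fold, started with pts ++ [(x,y)], produces pts ++ the zipped per-axis scans
theorem pvFoldA_eq_zip (l : List Int) (pts : List (Int × Int)) (x y : Int) :
    (l.foldl
      (fun (st : List (Int × Int) × Int × Int) code =>
        let (dx, dy) := PySem.Dict.getD pvDirMapA code (0, 0)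
        let cx := st.2.1 + dx
        let cy := st.2.2 + dy
        (st.1 ++ [(cx, cy)], cx, cy))
      (pts ++ [(x, y)], x, y)).1
    = pts ++ (List.scanl (fun a c => a + pvDx c) x l).zip
              (List.scanl (fun a c => a + pvDy c) y l) := by
  induction l generalizing pts x y with
  | nil => simp
  | cons c cs ih =>
    simp only [List.foldl_cons, List.scanl_cons, pvDirMap_eq_dxdy, List.zip_cons_cons]
    simpa [List.append_assoc, pvDirMap_eq_dxdy] using ih (pts ++ [(x, y)]) (x + pvDx c) (y + pvDy c)

-- ===== VERDICT (by name: the statement is the Claim_ definition above) =====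
theorem decode_freeman_8_spec : Claim_equal_decode_freeman_8 := by
  intro chain_code start_point _
  unfold Spec_decode_freeman_8 decode_freeman_8 decode_freeman_8_alt pvAxis
  have hA := pvFoldA_eq_zip chain_code [] start_point.1 start_point.2
  have hx := pvAxis_eq_scanl pvDx chain_code [] start_point.1
  have hy := pvAxis_eq_scanl pvDy chain_code [] start_point.2
  simp only [List.nil_append] at hA hx hy
  simp [hA, hx, hy]
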